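-- pv_equiv track=rewrite | github.com/fonolog/rijmwoordenboek | rijmwoordenboek.py | zoek_alliteratie
-- ===== SOURCE A (Python) =====
-- vowels = {'@', 'A', 'a', 'E', 'I', 'e', '|', '}', 'o', 'O', 'i', 'y', 'u', 'L', 'K', 'M'}
--
-- def zoek_alliteratie(woord):
--     accent = woord.rfind('\'')
--     voorstuk = (woord[:accent])
--     onset = ""
--     for i, e in enumerate(voorstuk[::-1]):
--         if e in vowels: break
--         onset += e
--     return onset[::-1]
-- ===== SOURCE B (Python) =====
-- vowels = {'@', 'A', 'a', 'E', 'I', 'e', '|', '}', 'o', 'O', 'i', 'y', 'u', 'L', 'K', 'M'}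
--
-- def zoek_alliteratie(woord):
--     accent = woord.rfind('\'')
--     voorstuk = woord[:accent]
--     cut = -1                      # index of the rightmost vowel in voorstuk, -1 if none
--     for i, c in enumerate(voorstuk):
--         if c in vowels:
--             cut = i
--     return voorstuk[cut + 1:]
-- ===== Notes on version B (the rewrite author's own statement) =====
-- stated objective: simpler
-- what changed: Instead of reversing the prefix, accumulating consonants into a string with a break and reversing back, B does one forward scan that records the index of the rightmost vowel and returns the single slice after it.
import Mathlib
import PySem

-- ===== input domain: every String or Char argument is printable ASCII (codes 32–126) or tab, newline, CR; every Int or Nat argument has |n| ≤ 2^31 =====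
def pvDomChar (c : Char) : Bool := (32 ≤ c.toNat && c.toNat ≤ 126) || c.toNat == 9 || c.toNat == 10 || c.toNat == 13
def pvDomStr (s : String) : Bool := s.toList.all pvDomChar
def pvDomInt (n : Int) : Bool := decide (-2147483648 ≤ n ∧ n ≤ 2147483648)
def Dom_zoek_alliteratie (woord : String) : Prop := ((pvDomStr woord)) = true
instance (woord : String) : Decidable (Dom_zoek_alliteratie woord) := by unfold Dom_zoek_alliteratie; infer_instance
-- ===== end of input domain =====

-- B is simpler: a single forward scan records the rightmost vowel index and slices once,
-- instead of A's reverse-scan-with-break that builds a reversed string and reverses it back.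

def pvVowels : List Char := ['@', 'A', 'a', 'E', 'I', 'e', '|', '}', 'o', 'O', 'i', 'y', 'u', 'L', 'K', 'M']

-- ===== PORT A =====
-- the 'for … break' loop over voorstuk[::-1]: onset accumulator, stop at the first vowel
def pvOnsetA : List Char → List Char → List Char
  | acc, [] => acc
  | acc, e :: rest => if e ∈ pvVowels then acc else pvOnsetA (acc ++ [e]) rest

def zoek_alliteratie (woord : String) : String :=
  let accent : Int := PySem.Str.rfind woord "'"
  let voorstuk : List Char := PySem.Chars.slice woord.toList none (some accent)
  let onset : List Char := pvOnsetA [] ((PySem.List.slice? voorstuk none none (-1)).getD [])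
  String.ofList ((PySem.List.slice? onset none none (-1)).getD [])

-- ===== PORT B =====
def zoek_alliteratie_alt (woord : String) : String :=
  let accent : Int := PySem.Str.rfind woord "'"
  let voorstuk : List Char := PySem.Chars.slice woord.toList none (some accent)
  let cut : Int := (PySem.List.enumerate voorstuk).foldl
      (fun cut ic => if ic.2 ∈ pvVowels then ic.1 else cut) (-1)
  String.ofList (PySem.Chars.slice voorstuk (some (cut + 1)) none)

-- ===== PRECONDITION & SPEC =====
def Spec_zoek_alliteratie (woord : String) (out : String) : Prop := out = zoek_alliteratie_alt woord
instance (woord : String) (out : String) : Decidable (Spec_zoek_alliteratie woord out) := by unfold Spec_zoek_alliteratie; infer_instance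

-- ===== CLAIM (what is proved, stated in full; the proofs are below) =====
def Claim_equal_zoek_alliteratie : Prop := ∀ (woord : String), Dom_zoek_alliteratie woord → Spec_zoek_alliteratie woord (zoek_alliteratie woord)

-- ===== LEMMAS AND PROOFS =====

def pvStep : Int → Int × Char → Int := fun cut ic => if ic.2 ∈ pvVowels then ic.1 else cut

theorem pvOnsetA_eq_takeWhile (l acc : List Char) :
    pvOnsetA acc l = acc ++ l.takeWhile (fun c => !decide (c ∈ pvVowels)) := by
  induction l generalizing acc with
  | nil => simp [pvOnsetA]
  | cons e rest ih =>
    by_cases h : e ∈ pvVowels <;> simp [pvOnsetA, h, ih, List.takeWhile]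

theorem pvEnumerate_snoc (xs : List Char) (x : Char) (s : Int) :
    PySem.List.enumerate (xs ++ [x]) s = PySem.List.enumerate xs s ++ [((s + xs.length : Int), x)] := by
  induction xs generalizing s with
  | nil => simp [PySem.List.enumerate_cons, PySem.List.enumerate_nil]
  | cons y ys ih =>
    simp [PySem.List.enumerate_cons, ih]
    ring_nf

theorem pvCut_lt (xs : List Char) (s a : Int) (h : a < s) :
    (PySem.List.enumerate xs s).foldl pvStep a < s + xs.length := by
  induction xs generalizing s a with
  | nil => simpa [PySem.List.enumerate_nil] using h
  | cons y ys ih =>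
    rw [PySem.List.enumerate_cons]
    simp only [List.foldl_cons, List.length_cons]
    have h' : pvStep a (s, y) < s + 1 := by
      unfold pvStep; split <;> omega
    have := ih (s + 1) (pvStep a (s, y)) h'
    push_cast at this ⊢
    omega

theorem pvCut_ge (xs : List Char) (s a : Int) (h : -1 ≤ a) (hs : 0 ≤ s) :
    (-1 : Int) ≤ (PySem.List.enumerate xs s).foldl pvStep a := by
  induction xs generalizing s a with
  | nil => simpa [PySem.List.enumerate_nil] using h
  | cons y ys ih =>
    rw [PySem.List.enumerate_cons]
    simp only [List.foldl_cons]
    refine ih (s + 1) (pvStep a (s, y)) ?_ (by omega)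
    unfold pvStep; split <;> omega

theorem pvMain (v : List Char) :
    (v.reverse.takeWhile (fun c => !decide (c ∈ pvVowels))).reverse
      = v.drop (((PySem.List.enumerate v 0).foldl pvStep (-1)) + 1).toNat := by
  induction v using List.reverseRecOn with
  | nil => simp [PySem.List.enumerate_nil]
  | append_singleton xs x ih =>
    rw [pvEnumerate_snoc, List.foldl_append]
    simp only [List.foldl_cons, List.foldl_nil, List.reverse_append, List.reverse_cons,
      List.reverse_nil, List.nil_append, List.singleton_append, List.takeWhile]
    by_cases h : x ∈ pvVowels
    · have hn : ((xs.length : Int) + 1).toNat = xs.length + 1 := by omega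
      simp [pvStep, h, hn, List.drop_eq_nil_of_le]
    · have hlt : (PySem.List.enumerate xs 0).foldl pvStep (-1) < (0 : Int) + xs.length :=
        pvCut_lt xs 0 (-1) (by omega)
      have hle : (((PySem.List.enumerate xs 0).foldl pvStep (-1)) + 1).toNat ≤ xs.length := by
        omega
      simp [pvStep, h, List.drop_append_of_le_length hle, ih]

-- ===== VERDICT (by name: the statement is the Claim_ definition above) =====
theorem zoek_alliteratie_spec : Claim_equal_zoek_alliteratie := by
  intro woord _
  unfold Spec_zoek_alliteratie zoek_alliteratie zoek_alliteratie_alt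
  simp only [PySem.List.slice?_none_none_neg_one, Option.getD_some]
  rw [pvOnsetA_eq_takeWhile]
  simp only [List.nil_append, PySem.Chars.slice_eq_listSlice]
  have hstep : (fun (cut : Int) (ic : Int × Char) => if ic.2 ∈ pvVowels then ic.1 else cut) = pvStep := rfl
  rw [hstep]
  set v := PySem.List.slice woord.toList none (some (PySem.Str.rfind woord "'")) with hv
  have hge := pvCut_ge v 0 (-1) (by omega) (by omega)
  have h01 : (0 : Int) ≤ (PySem.List.enumerate v 0).foldl pvStep (-1) + 1 := by omega
  simp only [PySem.List.slice_from v h01]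
  exact congrArg String.ofList (pvMain v)
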